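-- pv_equiv track=rewrite | github.com/StuartSpiegel/AOC2024 | Day 17 - Chronospatial Computer/ChronospatialComputerPart2.py | const_bits
-- ===== SOURCE A (Python) =====
-- def const_bits(value, length=1000):
--     arr = [-1]*length
--     i = 0
--     v = value
--     while v > 0 and i < length:
--         if v & 1:
--             arr[i] = -2  # known 1
--         else:
--             arr[i] = -1  # known 0
--         i += 1
--         v >>= 1
--     return arr
-- ===== SOURCE B (Python) =====
-- def const_bits(value, length=1000):
--     arr = [-1] * length
--     if value > 0:
--         s = bin(value)[2:]
--         n = len(s)
--         for idx in range(min(n, length)):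
--             if s[n - 1 - idx] == '1':
--                 arr[idx] = -2
--     return arr
-- ===== Notes on version B (the rewrite author's own statement) =====
-- stated objective: alternative
-- what changed: B scans the binary-string representation bin(value)[2:] from its least-significant end and marks only the 1-bits, instead of A's while-loop shifting an integer accumulator and writing a value for every bit position.
import Mathlib
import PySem

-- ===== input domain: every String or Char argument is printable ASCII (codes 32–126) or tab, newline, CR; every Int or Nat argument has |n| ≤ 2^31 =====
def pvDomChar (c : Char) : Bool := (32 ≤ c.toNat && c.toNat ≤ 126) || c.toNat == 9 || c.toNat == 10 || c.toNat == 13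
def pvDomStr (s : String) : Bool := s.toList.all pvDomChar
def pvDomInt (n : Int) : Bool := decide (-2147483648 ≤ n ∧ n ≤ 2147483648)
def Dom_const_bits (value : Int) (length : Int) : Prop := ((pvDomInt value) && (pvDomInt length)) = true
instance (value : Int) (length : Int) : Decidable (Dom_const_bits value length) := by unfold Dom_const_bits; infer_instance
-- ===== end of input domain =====

-- B scans the binary-string representation bin(value)[2:] from its least-significant end and marks only the 1-bits, instead of A's shifting integer accumulator; same return value, alternative structure.

-- ===== PORT A =====
-- while v > 0 and i < length: arr[i] := -2 / -1 by v & 1; i += 1; v >>= 1.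
-- For v > 0, 'v & 1 == 1' is 'PySem.Int.mod v 2 = 1' and 'v >> 1' is 'PySem.Int.floordiv v 2' (exact there).
def constBitsLoopA (arr : List Int) (i : Int) (len : Int) (v : Int) : List Int :=
  if h : 0 < v ∧ i < len then
    constBitsLoopA
      (arr.set i.toNat (if PySem.Int.mod v 2 = 1 then -2 else -1))
      (i + 1) len (PySem.Int.floordiv v 2)
  else arr
termination_by v.toNat
decreasing_by
  have h2 : PySem.Int.floordiv v 2 = v / 2 := PySem.Int.floordiv_eq_ediv_of_pos (by omega)
  rw [h2]; omega

def const_bits (value : Int) (length : Int) : List Int :=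
  constBitsLoopA (List.replicate length.toNat (-1)) 0 length value

-- ===== PORT B =====
-- bin(m)[2:] for m > 0: binary digits as chars, most-significant first (binDigits 0 = []).
def binDigits (m : Nat) : List Char :=
  if m = 0 then [] else binDigits (m / 2) ++ [if m % 2 = 1 then '1' else '0']

def const_bits_alt (value : Int) (length : Int) : List Int :=
  let arr := List.replicate length.toNat (-1 : Int)
  if 0 < value then
    let s := binDigits value.toNat
    let n := s.length
    (List.range (min n length.toNat)).foldl
      (fun a idx => if s.getD (n - 1 - idx) ' ' = '1' then a.set idx (-2) else a) arr
  else arr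

-- ===== PRECONDITION & SPEC =====
def Spec_const_bits (value : Int) (length : Int) (out : List Int) : Prop := out = const_bits_alt value length
instance (value : Int) (length : Int) (out : List Int) : Decidable (Spec_const_bits value length out) := by unfold Spec_const_bits; infer_instance

-- ===== CLAIM (what is proved, stated in full; the proofs are below) =====
def Claim_equal_const_bits : Prop := ∀ (value : Int) (length : Int), Dom_const_bits value length → Spec_const_bits value length (const_bits value length)

-- ===== LEMMAS AND PROOFS =====

-- least-significant-first bits of a natural number (proof-only helper)
def lsbBits (m : Nat) : List Bool :=
  if m = 0 then [] else (m % 2 = 1) :: lsbBits (m / 2)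

theorem lsbBits_zero : lsbBits 0 = [] := by rw [lsbBits]; simp

theorem lsbBits_pos {m : Nat} (h : m ≠ 0) :
    lsbBits m = (decide (m % 2 = 1)) :: lsbBits (m / 2) := by
  rw [lsbBits, if_neg h]

theorem getD_lsbBits_ne_zero {m j : Nat} (h : (lsbBits m).getD j false = true) : m ≠ 0 := by
  intro h0; subst h0; rw [lsbBits_zero] at h; simp at h

theorem getD_set_ne {l : List Int} {i j : Nat} {a d : Int} (h : i ≠ j) :
    (l.set i a).getD j d = l.getD j d := by
  rw [List.getD_eq_getElem?_getD, List.getD_eq_getElem?_getD, List.getElem?_set, if_neg h]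

theorem getD_set_self {l : List Int} {i : Nat} {a d : Int} (h : i < l.length) :
    (l.set i a).getD i d = a := by
  rw [List.getD_eq_getElem?_getD, List.getElem?_set]; simp [h]

theorem getD_replicate {n j : Nat} {a d : Int} (h : j < n) :
    (List.replicate n a).getD j d = a := by
  rw [List.getD_eq_getElem?_getD, List.getElem?_replicate]; simp [h]

-- ===== A side =====

theorem loopA_length (len : Int) (arr : List Int) (i v : Int) :
    (constBitsLoopA arr i len v).length = arr.length := by
  induction arr, i, v using constBitsLoopA.induct len with
  | case1 arr i v h ih => rw [constBitsLoopA, dif_pos h]; simpa using ih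
  | case2 arr i v h => rw [constBitsLoopA, dif_neg h]

theorem loopA_getD (len : Int) : ∀ (arr : List Int) (i v : Int), 0 ≤ v → 0 ≤ i →
    arr.length = len.toNat →
    (∀ j, i.toNat ≤ j → j < arr.length → arr.getD j 0 = -1) →
    ∀ j, j < arr.length →
      (constBitsLoopA arr i len v).getD j 0 =
        if i.toNat ≤ j ∧ (lsbBits v.toNat).getD (j - i.toNat) false = true then -2
        else arr.getD j 0 := by
  intro arr i v
  induction arr, i, v using constBitsLoopA.induct len with
  | case1 arr i v h ih =>
    intro hv hi hlen hdef j hj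
    rw [constBitsLoopA, dif_pos h]
    have hv2 : PySem.Int.floordiv v 2 = v / 2 := PySem.Int.floordiv_eq_ediv_of_pos (by omega)
    have hm2 : PySem.Int.mod v 2 = v % 2 := PySem.Int.mod_eq_emod_of_pos (by omega)
    have hdiv : (PySem.Int.floordiv v 2).toNat = v.toNat / 2 := by rw [hv2]; omega
    have hmod : (PySem.Int.mod v 2 = 1) ↔ (v.toNat % 2 = 1) := by rw [hm2]; omega
    have hsucc : (i + 1).toNat = i.toNat + 1 := by omega
    have hbits := lsbBits_pos (show v.toNat ≠ 0 by omega)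
    simp only [dite_eq_ite] at ih
    have hdef' : ∀ j, (i + 1).toNat ≤ j →
        j < (arr.set i.toNat (if PySem.Int.mod v 2 = 1 then -2 else -1)).length →
        (arr.set i.toNat (if PySem.Int.mod v 2 = 1 then -2 else -1)).getD j 0 = -1 := by
      intro j h1 h2
      rw [getD_set_ne (by omega)]
      exact hdef j (by omega) (by simpa using h2)
    rw [ih (by rw [hv2]; omega) (by omega) (by simpa using hlen) hdef' j (by simpa using hj)]
    rw [hdiv, hsucc, hbits]
    by_cases hji : j < i.toNat
    · rw [getD_set_ne (by omega), if_neg (by rintro ⟨h1, -⟩; omega),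
        if_neg (by rintro ⟨h1, -⟩; omega)]
    · by_cases hji2 : j = i.toNat
      · subst hji2
        rw [if_neg (by rintro ⟨h1, -⟩; omega), getD_set_self hj]
        simp only [Nat.sub_self, List.getD_cons_zero]
        by_cases hm : v.toNat % 2 = 1
        · rw [if_pos (hmod.mpr hm), if_pos ⟨le_refl _, by simp [hm]⟩]
        · rw [if_neg (fun hc => hm (hmod.mp hc)),
            if_neg (by rintro ⟨-, hb⟩; simp at hb; exact hm hb)]
          exact (hdef i.toNat (le_refl _) hj).symm
      · rw [getD_set_ne (by omega)]
        rw [show j - i.toNat = (j - (i.toNat + 1)) + 1 from by omega, List.getD_cons_succ]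
        by_cases hb : (lsbBits (v.toNat / 2)).getD (j - (i.toNat + 1)) false = true
        · rw [if_pos ⟨by omega, hb⟩, if_pos ⟨by omega, hb⟩]
        · rw [if_neg (by rintro ⟨-, h2⟩; exact hb h2), if_neg (by rintro ⟨-, h2⟩; exact hb h2)]
  | case2 arr i v h =>
    intro hv hi hlen hdef j hj
    rw [constBitsLoopA, dif_neg h, if_neg]
    rintro ⟨h1, h2⟩
    rcases not_and_or.mp h with hv0 | hil
    · have hz : v.toNat = 0 := by omega
      rw [hz, lsbBits_zero] at h2; simp at h2
    · omega

theorem length_const_bits (value length : Int) :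
    (const_bits value length).length = length.toNat := by
  unfold const_bits; rw [loopA_length]; simp

theorem const_bits_getD (value length : Int) (j : Nat) (hj : j < length.toNat) :
    (const_bits value length).getD j 0 =
      if 0 < value ∧ (lsbBits value.toNat).getD j false = true then -2 else -1 := by
  unfold const_bits
  by_cases hv : 0 ≤ value
  · rw [loopA_getD length _ 0 value hv le_rfl (by simp)
      (fun j _ hj2 => getD_replicate (by simpa using hj2)) j (by simpa using hj)]
    simp only [Int.toNat_zero, Nat.sub_zero]
    by_cases hb : (lsbBits value.toNat).getD j false = true
    · rw [if_pos ⟨Nat.zero_le j, hb⟩,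
        if_pos ⟨by have := getD_lsbBits_ne_zero hb; omega, hb⟩]
    · rw [if_neg (by rintro ⟨-, h2⟩; exact hb h2),
        if_neg (by rintro ⟨-, h2⟩; exact hb h2), getD_replicate hj]
  · rw [constBitsLoopA, dif_neg (by rintro ⟨h1, -⟩; omega), getD_replicate hj,
      if_neg (by rintro ⟨h1, -⟩; omega)]

-- ===== B side =====

theorem binDigits_eq_reverse (m : Nat) :
    binDigits m = ((lsbBits m).map (fun b => if b then '1' else '0')).reverse := by
  induction m using Nat.strong_induction_on with
  | _ m ih =>
    rw [binDigits, lsbBits]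
    by_cases h : m = 0
    · simp [h]
    · simp only [h, if_false]
      rw [ih (m / 2) (by omega)]
      simp

theorem foldB_length (P : Nat → Prop) [DecidablePred P] (k : Nat) (arr : List Int) :
    ((List.range k).foldl (fun a idx => if P idx then a.set idx (-2) else a) arr).length
      = arr.length := by
  induction k with
  | zero => simp
  | succ k ih =>
    rw [List.range_succ, List.foldl_append, List.foldl_cons, List.foldl_nil]
    split <;> simp [ih]

theorem foldB_getD (P : Nat → Prop) [DecidablePred P] (k : Nat) (arr : List Int) (j : Nat)
    (hj : j < arr.length) :
    ((List.range k).foldl (fun a idx => if P idx then a.set idx (-2) else a) arr).getD j 0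
      = if j < k ∧ P j then -2 else arr.getD j 0 := by
  induction k with
  | zero => simp
  | succ k ih =>
    rw [List.range_succ, List.foldl_append, List.foldl_cons, List.foldl_nil]
    by_cases hp : P k
    · rw [if_pos hp]
      by_cases hjk : j = k
      · subst hjk
        rw [getD_set_self (by rw [foldB_length]; exact hj), if_pos ⟨by omega, hp⟩]
      · rw [getD_set_ne (fun h => hjk h.symm), ih]
        by_cases hb : P j
        · by_cases hlt : j < k
          · rw [if_pos ⟨hlt, hb⟩, if_pos ⟨by omega, hb⟩]
          · rw [if_neg (by rintro ⟨h1, -⟩; omega), if_neg (by rintro ⟨h1, -⟩; omega)]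
        · rw [if_neg (by rintro ⟨-, h2⟩; exact hb h2), if_neg (by rintro ⟨-, h2⟩; exact hb h2)]
    · rw [if_neg hp, ih]
      by_cases hb : P j
      · have hjk : j ≠ k := fun h => hp (h ▸ hb)
        by_cases hlt : j < k
        · rw [if_pos ⟨hlt, hb⟩, if_pos ⟨by omega, hb⟩]
        · rw [if_neg (by rintro ⟨h1, -⟩; omega), if_neg (by rintro ⟨h1, -⟩; omega)]
      · rw [if_neg (by rintro ⟨-, h2⟩; exact hb h2), if_neg (by rintro ⟨-, h2⟩; exact hb h2)]

theorem const_bits_alt_eq (value length : Int) :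
    const_bits_alt value length =
      if 0 < value then
        (List.range (min (binDigits value.toNat).length length.toNat)).foldl
          (fun a idx =>
            if (binDigits value.toNat).getD ((binDigits value.toNat).length - 1 - idx) ' ' = '1'
            then a.set idx (-2) else a)
          (List.replicate length.toNat (-1))
      else List.replicate length.toNat (-1) := rfl

theorem length_const_bits_alt (value length : Int) :
    (const_bits_alt value length).length = length.toNat := by
  rw [const_bits_alt_eq]
  by_cases hv : 0 < value
  · rw [if_pos hv, foldB_length]; simp
  · rw [if_neg hv]; simp

theorem const_bits_alt_getD (value length : Int) (j : Nat) (hj : j < length.toNat) :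
    (const_bits_alt value length).getD j 0 =
      if 0 < value ∧ (lsbBits value.toNat).getD j false = true then -2 else -1 := by
  rw [const_bits_alt_eq]
  by_cases hv : 0 < value
  · rw [if_pos hv, foldB_getD _ _ _ j (by simpa using hj)]
    have hs := binDigits_eq_reverse value.toNat
    have hn : (binDigits value.toNat).length = (lsbBits value.toNat).length := by
      rw [hs]; simp
    by_cases hjn : j < (lsbBits value.toNat).length
    · have hidx : (binDigits value.toNat).length - 1 - j < (binDigits value.toNat).length := by
        omega
      have hc : (binDigits value.toNat).getD ((binDigits value.toNat).length - 1 - j) ' '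
          = if (lsbBits value.toNat).getD j false then '1' else '0' := by
        rw [List.getD_eq_getElem _ _ hidx]
        have hrev : (binDigits value.toNat)[(binDigits value.toNat).length - 1 - j]'hidx
            = ((lsbBits value.toNat).map (fun b => if b then '1' else '0'))[j]'(by simpa) := by
          rw [List.getElem_of_eq hs, List.getElem_reverse]
          congr 1
          simp only [List.length_map]
          omega
        rw [hrev, List.getElem_map, List.getD_eq_getElem _ _ hjn]
      rw [hc]
      by_cases hb : (lsbBits value.toNat).getD j false = true
      · rw [if_pos ⟨by omega, by rw [hb]; simp⟩, if_pos ⟨hv, hb⟩]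
      · rw [if_neg, if_neg (by rintro ⟨-, h2⟩; exact hb h2), getD_replicate hj]
        rintro ⟨-, h2⟩
        simp only [Bool.not_eq_true] at hb
        rw [hb] at h2; simp at h2
    · have hd : (lsbBits value.toNat).getD j false = false :=
        List.getD_eq_default _ _ (by omega)
      rw [if_neg (by rintro ⟨h1, -⟩; omega),
        if_neg (by rintro ⟨-, h2⟩; rw [hd] at h2; simp at h2), getD_replicate hj]
  · rw [if_neg hv, getD_replicate hj, if_neg (by rintro ⟨h1, -⟩; exact hv h1)]

-- ===== VERDICT (by name: the statement is the Claim_ definition above) =====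
theorem const_bits_spec : Claim_equal_const_bits := by
  intro value length _
  unfold Spec_const_bits
  apply List.ext_getElem
  · rw [length_const_bits, length_const_bits_alt]
  · intro j h1 h2
    rw [← List.getD_eq_getElem _ 0 h1, ← List.getD_eq_getElem _ 0 h2,
      const_bits_getD value length j (by rw [← length_const_bits value length]; exact h1),
      const_bits_alt_getD value length j (by rw [← length_const_bits value length]; exact h1)]
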